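-- pv_equiv track=rewrite | github.com/MrBrantCode/unitest_baseline | mut_generate/mist_train_cf/cf_28934/solution.py | validateFileNames
-- ===== SOURCE A (Python) =====
-- from typing import List
--
-- def validateFileNames(fileNames: List[str]) -> List[bool]:
--     def is_valid_file_name(name: str) -> bool:
--         if any(char in name for char in "!@#$%^&*()-+=[]{}|\\;:'\",<>/?.~"):
--             return False
--         if name.startswith(" ") or name.endswith(" "):
--             return False
--         if "  " in name:
--             return False
--         return True
--
--     return [is_valid_file_name(name) for name in fileNames]
-- ===== SOURCE B (Python) =====
-- from typing import List
--
-- FORBIDDEN = set("!@#$%^&*()-+=[]{}|\\;:'\",<>/?.~")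
--
-- def validateFileNames(fileNames: List[str]) -> List[bool]:
--     def ok(name: str) -> bool:
--         prev = None
--         for ch in name:
--             if ch in FORBIDDEN or (ch == " " and prev == " "):
--                 return False
--             prev = ch
--         if name and (name[0] == " " or name[-1] == " "):
--             return False
--         return True
--
--     return [ok(name) for name in fileNames]
-- ===== Notes on version B (the rewrite author's own statement) =====
-- stated objective: faster
-- what changed: Replaces A's four separate scans of each name (30 per-character substring membership tests, startswith/endswith, and a substring search for double space) with a single left-to-right pass keeping the previous character, testing set membership and space adjacency per character, plus a constant-time endpoint check.
import Mathlib
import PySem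

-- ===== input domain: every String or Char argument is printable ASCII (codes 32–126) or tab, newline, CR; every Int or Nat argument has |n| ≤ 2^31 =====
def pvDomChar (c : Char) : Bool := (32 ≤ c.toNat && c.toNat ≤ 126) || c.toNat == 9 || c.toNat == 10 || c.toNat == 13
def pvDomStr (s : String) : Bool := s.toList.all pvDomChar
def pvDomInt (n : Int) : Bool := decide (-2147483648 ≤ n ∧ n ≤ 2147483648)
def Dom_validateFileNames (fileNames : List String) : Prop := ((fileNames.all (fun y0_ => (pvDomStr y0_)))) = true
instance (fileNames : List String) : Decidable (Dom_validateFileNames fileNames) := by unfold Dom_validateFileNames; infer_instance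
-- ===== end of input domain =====

-- B replaces A's four separate scans of each name by one left-to-right pass keeping the previous character (objective: alternative decomposition).

-- ===== PORT A =====
def pvForbiddenStr : String := "!@#$%^&*()-+=[]{}|\\;:'\",<>/?.~"

-- 'any(char in name for char in "…")': iterate the forbidden string, membership test of each char in name
def pvIsValidA (name : String) : Bool :=
  if pvForbiddenStr.toList.any (fun c => PySem.Str.isIn (String.ofList [c]) name) then false
  else if PySem.Str.startswith name " " || PySem.Str.endswith name " " then false
  else if PySem.Str.isIn "  " name then false
  else true

def validateFileNames (fileNames : List String) : List Bool :=
  fileNames.map pvIsValidA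

-- ===== PORT B =====
def pvForbidden : PySem.Set Char := PySem.Set.ofList ("!@#$%^&*()-+=[]{}|\\;:'\",<>/?.~".toList)

-- the single pass: 'for ch in name: if ch in FORBIDDEN or (ch == " " and prev == " "): return False; prev = ch'
def pvLoopB : List Char → Option Char → Bool
  | [], _ => true
  | ch :: rest, prev =>
      if PySem.Set.contains pvForbidden ch || (ch == ' ' && prev == some ' ') then false
      else pvLoopB rest (some ch)

-- 'if name and (name[0] == " " or name[-1] == " "): return False; return True'
def pvEndsOK : List Char → Bool
  | [] => true
  | c :: rest => if c == ' ' || rest.getLastD c == ' ' then false else true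

def pvIsValidB (name : String) : Bool :=
  if pvLoopB name.toList none then pvEndsOK name.toList else false

def validateFileNames_alt (fileNames : List String) : List Bool :=
  fileNames.map pvIsValidB

-- ===== PRECONDITION & SPEC =====
def Spec_validateFileNames (fileNames : List String) (out : List Bool) : Prop := out = validateFileNames_alt fileNames
instance (fileNames : List String) (out : List Bool) : Decidable (Spec_validateFileNames fileNames out) := by unfold Spec_validateFileNames; infer_instance

-- ===== CLAIM (what is proved, stated in full; the proofs are below) =====
def Claim_equal_validateFileNames : Prop := ∀ (fileNames : List String), Dom_validateFileNames fileNames → Spec_validateFileNames fileNames (validateFileNames fileNames)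

-- ===== LEMMAS AND PROOFS =====

-- double-space detector extracted from B's loop
def pvDbl : Option Char → List Char → Bool
  | _, [] => false
  | p, c :: rest => (c == ' ' && p == some ' ') || pvDbl (some c) rest

lemma pvLoopB_eq (cs : List Char) : ∀ prev : Option Char,
    pvLoopB cs prev = !(cs.any (fun c => PySem.Set.contains pvForbidden c) || pvDbl prev cs) := by
  induction cs with
  | nil => intro prev; rfl
  | cons c rest ih =>
      intro prev
      simp only [pvLoopB, pvDbl, List.any_cons]
      rw [ih (some c)]
      cases hF : PySem.Set.contains pvForbidden c <;>
        cases hG : (c == ' ' && prev == some ' ') <;>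
        cases hA : rest.any (fun c => PySem.Set.contains pvForbidden c) <;>
        cases hD : pvDbl (some c) rest <;> rfl

lemma pvDbl_iff (cs : List Char) : pvDbl none cs = true ↔ [' ', ' '] <:+: cs := by
  induction cs with
  | nil => simp [pvDbl]
  | cons c rest ih =>
      cases rest with
      | nil =>
          simp only [pvDbl, Bool.or_false]
          constructor
          · intro h; simp at h
          · intro h; have := h.sublist.length_le; simp at this
      | cons d rs =>
          have hstep : pvDbl none (c :: d :: rs) = ((d == ' ' && c == ' ') || pvDbl none (d :: rs)) := by
            simp only [pvDbl, Option.some_beq_some, Option.none_beq_some, Bool.and_false,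
              Bool.false_or]
          rw [hstep, List.infix_cons_iff]
          simp only [Bool.or_eq_true, Bool.and_eq_true, beq_iff_eq, ih,
            List.cons_prefix_cons, List.nil_prefix, and_true]
          constructor
          · rintro (⟨h1, h2⟩ | h)
            · exact Or.inl ⟨h2.symm, h1.symm⟩
            · exact Or.inr h
          · rintro (⟨h1, h2⟩ | h)
            · exact Or.inl ⟨h2.symm, h1.symm⟩
            · exact Or.inr h

-- A's per-char membership test equals membership of the char in the name
lemma pvSingle_isIn (c : Char) (name : String) :
    PySem.Str.isIn (String.ofList [c]) name = name.toList.contains c := by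
  rw [Bool.eq_iff_iff, PySem.Str.isIn_iff_infix]
  have h1 : (String.ofList [c]).toList = [c] := by simp
  rw [h1]
  simp only [List.contains_eq_mem, decide_eq_true_eq]
  constructor
  · intro h; exact h.mem (by simp)
  · intro h
    obtain ⟨l1, l2, hm⟩ := List.append_of_mem h
    exact ⟨l1, l2, by rw [hm]; simp⟩

lemma pvForbAny (name : String) :
    pvForbiddenStr.toList.any (fun c => PySem.Str.isIn (String.ofList [c]) name)
      = name.toList.any (fun c => PySem.Set.contains pvForbidden c) := by
  rw [Bool.eq_iff_iff]
  simp only [List.any_eq_true, pvSingle_isIn, List.contains_eq_mem, decide_eq_true_eq,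
    PySem.Set.contains_iff, pvForbidden, PySem.Set.mem_ofList, pvForbiddenStr]
  exact ⟨fun ⟨c, h1, h2⟩ => ⟨c, h2, h1⟩, fun ⟨c, h1, h2⟩ => ⟨c, h2, h1⟩⟩

lemma pvStarts (name : String) :
    PySem.Str.startswith name " " = (name.toList.head? == some ' ') := by
  rw [Bool.eq_iff_iff]
  rw [PySem.Str.startswith_eq, PySem.Chars.startswith_iff]
  have h1 : (" " : String).toList = [' '] := by decide
  rw [h1]
  cases h : name.toList with
  | nil =>
      constructor
      · intro hp; have := hp.length_le; simp at this
      · intro hh; simp at hh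
  | cons c rest =>
      rw [List.cons_prefix_cons]
      constructor
      · rintro ⟨h1, _⟩; exact beq_iff_eq.mpr (congrArg some h1.symm)
      · intro hh
        have h2 : c = ' ' := by injection beq_iff_eq.mp hh
        exact ⟨h2.symm, List.nil_prefix⟩

lemma pvEnds (name : String) :
    PySem.Str.endswith name " " = (name.toList.getLast? == some ' ') := by
  rw [Bool.eq_iff_iff]
  rw [PySem.Str.endswith_eq, PySem.Chars.endswith_iff]
  have h1 : (" " : String).toList = [' '] := by decide
  rw [h1]
  constructor
  · rintro ⟨t, ht⟩
    simp [← ht, List.getLast?_append]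
  · intro h
    simp only [beq_iff_eq] at h
    obtain ⟨t, ht⟩ := List.getLast?_eq_some_iff.mp h
    exact ⟨t, by simp [ht]⟩

lemma pvIsIn2 (name : String) : PySem.Str.isIn "  " name = pvDbl none name.toList := by
  rw [Bool.eq_iff_iff, PySem.Str.isIn_iff_infix, pvDbl_iff]
  have h1 : ("  " : String).toList = [' ', ' '] := by decide
  rw [h1]

lemma pvValid_eq (name : String) : pvIsValidA name = pvIsValidB name := by
  unfold pvIsValidA pvIsValidB
  rw [pvForbAny, pvStarts, pvEnds, pvIsIn2, pvLoopB_eq]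
  cases h : name.toList with
  | nil => rfl
  | cons c rest =>
      have hS : ((c :: rest).head? == some ' ') = (c == ' ') := by simp
      have hE : ((c :: rest).getLast? == some ' ') = (rest.getLastD c == ' ') := by
        simp [List.getLast?_cons, List.getLastD_eq_getLast?]
      rw [hS, hE]
      simp only [pvEndsOK]
      cases hA : (c :: rest).any (fun c => PySem.Set.contains pvForbidden c) <;>
        cases hc : (c == ' ') <;>
        cases hl : (rest.getLastD c == ' ') <;>
        cases hD : pvDbl none (c :: rest) <;> rfl

-- ===== VERDICT (by name: the statement is the Claim_ definition above) =====
theorem validateFileNames_spec : Claim_equal_validateFileNames := by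
  intro fileNames _
  unfold Spec_validateFileNames validateFileNames validateFileNames_alt
  exact List.map_congr_left (fun name _ => pvValid_eq name)
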